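-- pv_equiv track=rewrite | github.com/yuhua0731/Explore_leet | solution.py | countValidWords
-- ===== SOURCE A (Python) =====
-- def countValidWords(sentence: str) -> int:
--     words = sentence.split(' ')
--     ans = 0
--     for w in words:
--         if w:
--             n = len(w)
--             dash_count = 0
--             for i in range(n):
--                 if w[i] == '-':
--                     if 0 < i < n - 1 and w[i - 1].isalpha() and w[i + 1].isalpha():
--                         dash_count += 1
--                     else:
--                         ans -= 1
--                         break
--                 if w[i].isdigit() or (w[i] in [',', '!', '.'] and i != n - 1) or dash_count > 1:
--                     ans -= 1
--                     break
--             ans += 1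
--     return ans
-- ===== SOURCE B (Python) =====
-- def countValidWords(sentence: str) -> int:
--     def valid(w):
--         if any(c.isdigit() for c in w):
--             return False
--         n = len(w)
--         if any((w[i] in ',!.') and i != n - 1 for i in range(n)):
--             return False
--         dashes = [i for i in range(n) if w[i] == '-']
--         if len(dashes) > 1:
--             return False
--         return all(0 < i < n - 1 and w[i - 1].isalpha() and w[i + 1].isalpha()
--                    for i in dashes)
--     return sum(1 for w in sentence.split(' ') if w and valid(w))
-- ===== Notes on version B (the rewrite author's own statement) =====
-- stated objective: simpler
-- what changed: Replaces A's single interleaved early-break scan with mutable dash_count/ans bookkeeping by a per-word boolean predicate made of independent passes (digit scan, misplaced-punctuation scan, collected dash index list) plus a counting comprehension.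
import Mathlib
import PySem

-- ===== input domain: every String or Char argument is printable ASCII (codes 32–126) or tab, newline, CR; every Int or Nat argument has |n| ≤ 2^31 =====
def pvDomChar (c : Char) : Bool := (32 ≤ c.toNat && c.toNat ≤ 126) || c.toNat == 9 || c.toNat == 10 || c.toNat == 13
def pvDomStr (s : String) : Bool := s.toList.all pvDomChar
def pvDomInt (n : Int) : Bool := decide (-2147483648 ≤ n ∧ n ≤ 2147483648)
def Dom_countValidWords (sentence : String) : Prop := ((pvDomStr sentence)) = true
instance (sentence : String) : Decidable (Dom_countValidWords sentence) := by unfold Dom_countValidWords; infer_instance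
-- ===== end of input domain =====

-- B replaces A's interleaved early-break scan by a per-word predicate of independent passes; objective: simpler.


-- ===== PORT A =====
-- inner for-loop of A (i over range(n), state dash_count); returns the net change to ans
-- made inside the loop for this word: -1 on break, 0 on normal exit.
def pvALoop (cs : List Char) (n : Nat) (i : Nat) (dash : Nat) : Int :=
  if i < n then
    let c := cs.getD i ' '
    if c = '-' then
      if 0 < i ∧ i < n - 1 ∧ PySem.Chars.isalpha (cs.getD (i - 1) ' ') = true
          ∧ PySem.Chars.isalpha (cs.getD (i + 1) ' ') = true then
        if PySem.Chars.isdigit c = true ∨ ((c = ',' ∨ c = '!' ∨ c = '.') ∧ i ≠ n - 1) ∨ dash + 1 > 1 then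
          -1
        else pvALoop cs n (i + 1) (dash + 1)
      else -1
    else
      if PySem.Chars.isdigit c = true ∨ ((c = ',' ∨ c = '!' ∨ c = '.') ∧ i ≠ n - 1) ∨ dash > 1 then
        -1
      else pvALoop cs n (i + 1) dash
  else 0
termination_by n - i

def countValidWords (sentence : String) : Int :=
  (PySem.Chars.splitOn sentence.toList [' ']).foldl
    (fun ans w =>
      if w ≠ [] then
        (ans + pvALoop w w.length 0 0) + 1
      else ans) 0

-- ===== PORT B =====
-- per-word predicate of Source B: independent passes
def pvValid (cs : List Char) : Bool :=
  if cs.any PySem.Chars.isdigit then false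
  else
    let n := cs.length
    if (List.range n).any (fun i =>
        decide ((cs.getD i ' ' = ',' ∨ cs.getD i ' ' = '!' ∨ cs.getD i ' ' = '.') ∧ i ≠ n - 1)) then
      false
    else
      let dashes := (List.range n).filter (fun i => cs.getD i ' ' == '-')
      if dashes.length > 1 then false
      else dashes.all (fun i =>
        decide (0 < i) && decide (i < n - 1)
          && PySem.Chars.isalpha (cs.getD (i - 1) ' ')
          && PySem.Chars.isalpha (cs.getD (i + 1) ' '))

def countValidWords_alt (sentence : String) : Int :=
  (PySem.Chars.splitOn sentence.toList [' ']).foldl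
    (fun acc w => if w ≠ [] ∧ pvValid w = true then acc + 1 else acc) 0

-- ===== PRECONDITION & SPEC =====
def Spec_countValidWords (sentence : String) (out : Int) : Prop := out = countValidWords_alt sentence
instance (sentence : String) (out : Int) : Decidable (Spec_countValidWords sentence out) := by unfold Spec_countValidWords; infer_instance

-- ===== CLAIM (what is proved, stated in full; the proofs are below) =====
def Claim_equal_countValidWords : Prop := ∀ (sentence : String), Dom_countValidWords sentence → Spec_countValidWords sentence (countValidWords sentence)

-- ===== LEMMAS AND PROOFS =====

-- a position j of the word passes all of A's per-character checks
def pvGood (cs : List Char) (n : Nat) (j : Nat) : Prop :=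
  PySem.Chars.isdigit (cs.getD j ' ') = false
  ∧ ¬((cs.getD j ' ' = ',' ∨ cs.getD j ' ' = '!' ∨ cs.getD j ' ' = '.') ∧ j ≠ n - 1)
  ∧ (cs.getD j ' ' = '-' →
      (0 < j ∧ j < n - 1 ∧ PySem.Chars.isalpha (cs.getD (j - 1) ' ') = true
        ∧ PySem.Chars.isalpha (cs.getD (j + 1) ' ') = true))

-- number of dashes at indices in [i, n)
def pvDcnt (cs : List Char) (n : Nat) (i : Nat) : Nat :=
  (List.range' i (n - i)).countP (fun j => cs.getD j ' ' == '-')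

lemma pvALoop_mem (cs : List Char) (n : Nat) :
    ∀ k i dash, n - i = k → pvALoop cs n i dash = 0 ∨ pvALoop cs n i dash = -1 := by
  intro k
  induction k with
  | zero =>
    intro i dash h
    rw [pvALoop]
    simp [Nat.not_lt.mpr (Nat.le_of_sub_eq_zero h)]
  | succ k ih =>
    intro i dash h
    have hi : i < n := by omega
    rw [pvALoop]
    simp only [hi, if_pos]
    split_ifs <;>
      first
        | exact ih (i + 1) _ (by omega)
        | exact Or.inr rfl

lemma pvDcnt_step (cs : List Char) (n i : Nat) (h : i < n) :
    pvDcnt cs n i = (if cs.getD i ' ' = '-' then 1 else 0) + pvDcnt cs n (i + 1) := by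
  unfold pvDcnt
  have : n - i = (n - (i + 1)) + 1 := by omega
  rw [this, List.range'_succ, List.countP_cons]
  by_cases hc : cs.getD i ' ' = '-' <;> simp [hc] <;> omega

lemma pvDcnt_zero (cs : List Char) (n i : Nat) (h : ¬ i < n) : pvDcnt cs n i = 0 := by
  unfold pvDcnt
  have : n - i = 0 := by omega
  simp [this]

lemma pvALoop_char (cs : List Char) (n : Nat) :
    ∀ k i dash, n - i = k → dash ≤ 1 →
      (pvALoop cs n i dash = 0 ↔
        ((∀ j, i ≤ j → j < n → pvGood cs n j) ∧ dash + pvDcnt cs n i ≤ 1)) := by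
  intro k
  induction k with
  | zero =>
    intro i dash h hd
    have hni : ¬ i < n := by omega
    rw [pvALoop]
    simp only [hni, if_false]
    rw [pvDcnt_zero cs n i hni]
    constructor
    · intro _; exact ⟨fun j h1 h2 => absurd (by omega : i < n) hni, by omega⟩
    · intro _; trivial
  | succ k ih =>
    intro i dash h hd
    have hi : i < n := by omega
    rw [pvALoop]
    simp only [hi, if_pos]
    by_cases hdash : cs.getD i ' ' = '-'
    · simp only [hdash, if_pos]
      by_cases hint : 0 < i ∧ i < n - 1 ∧ PySem.Chars.isalpha (cs.getD (i - 1) ' ') = true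
          ∧ PySem.Chars.isalpha (cs.getD (i + 1) ' ') = true
      · rw [if_pos hint]
        have hdig : PySem.Chars.isdigit '-' = false := by decide
        have hpun : ¬(('-' = ',' ∨ '-' = '!' ∨ '-' = '.') ∧ i ≠ n - 1) := by
          intro ⟨h1, _⟩; rcases h1 with h1 | h1 | h1 <;> exact absurd h1 (by decide)
        by_cases hd1 : dash + 1 > 1
        · have hcond : PySem.Chars.isdigit '-' = true
              ∨ (('-' = ',' ∨ '-' = '!' ∨ '-' = '.') ∧ i ≠ n - 1)
              ∨ dash + 1 > 1 := Or.inr (Or.inr hd1)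
          rw [if_pos hcond]
          constructor
          · intro habs; exact absurd habs (by decide)
          · intro ⟨_, hcnt⟩
            rw [pvDcnt_step cs n i hi, if_pos hdash] at hcnt
            omega
        · have hcond : ¬(PySem.Chars.isdigit '-' = true
              ∨ (('-' = ',' ∨ '-' = '!' ∨ '-' = '.') ∧ i ≠ n - 1)
              ∨ dash + 1 > 1) := by
            rintro (h1 | ⟨h1, h2⟩ | h1)
            · rw [hdig] at h1; exact absurd h1 (by decide)
            · exact hpun ⟨h1, h2⟩
            · omega
          rw [if_neg hcond]
          rw [ih (i + 1) (dash + 1) (by omega) (by omega)]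
          rw [pvDcnt_step cs n i hi, if_pos hdash]
          constructor
          · intro ⟨hall, hcnt⟩
            refine ⟨fun j hj1 hj2 => ?_, by omega⟩
            rcases Nat.eq_or_lt_of_le hj1 with rfl | hj
            · exact ⟨by rw [hdash]; exact hdig, by rw [hdash]; exact hpun, fun _ => hint⟩
            · exact hall j hj hj2
          · intro ⟨hall, hcnt⟩
            exact ⟨fun j hj1 hj2 => hall j (by omega) hj2, by omega⟩
      · rw [if_neg hint]
        constructor
        · intro habs; exact absurd habs (by decide)
        · intro ⟨hall, _⟩
          exact absurd ((hall i le_rfl hi).2.2 hdash) hint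
    · simp only [hdash, if_neg, not_false_iff]
      by_cases hbad : PySem.Chars.isdigit (cs.getD i ' ') = true
          ∨ ((cs.getD i ' ' = ',' ∨ cs.getD i ' ' = '!' ∨ cs.getD i ' ' = '.') ∧ i ≠ n - 1)
          ∨ dash > 1
      · rw [if_pos hbad]
        constructor
        · intro habs; exact absurd habs (by decide)
        · intro ⟨hall, _⟩
          have hg := hall i le_rfl hi
          rcases hbad with hb | hb | hb
          · rw [hg.1] at hb; exact absurd hb (by decide)
          · exact (hg.2.1 hb).elim
          · exact absurd hb (by omega)
      · rw [if_neg hbad]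
        rw [ih (i + 1) dash (by omega) hd]
        rw [pvDcnt_step cs n i hi, if_neg hdash]
        have hA : PySem.Chars.isdigit (cs.getD i ' ') = false := by
          cases hx : PySem.Chars.isdigit (cs.getD i ' ')
          · rfl
          · exact absurd (Or.inl hx) hbad
        have hB : ¬((cs.getD i ' ' = ',' ∨ cs.getD i ' ' = '!' ∨ cs.getD i ' ' = '.') ∧ i ≠ n - 1) :=
          fun h1 => hbad (Or.inr (Or.inl h1))
        constructor
        · intro ⟨hall, hcnt⟩
          refine ⟨fun j hj1 hj2 => ?_, by omega⟩
          rcases Nat.eq_or_lt_of_le hj1 with rfl | hj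
          · exact ⟨hA, hB, fun h1 => absurd h1 hdash⟩
          · exact hall j hj hj2
        · intro ⟨hall, hcnt⟩
          exact ⟨fun j hj1 hj2 => hall j (by omega) hj2, by omega⟩

lemma pvValid_iff (cs : List Char) :
    pvValid cs = true ↔
      ((∀ j, 0 ≤ j → j < cs.length → pvGood cs cs.length j)
        ∧ 0 + pvDcnt cs cs.length 0 ≤ 1) := by
  unfold pvValid pvGood pvDcnt
  simp only [Nat.zero_add, Nat.zero_le, true_implies, Nat.sub_zero,
    ← List.range_eq_range']
  by_cases hdig : cs.any PySem.Chars.isdigit = true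
  · rw [if_pos hdig]
    rw [List.any_eq_true] at hdig
    obtain ⟨c, hc, hcd⟩ := hdig
    obtain ⟨j, hj, rfl⟩ := List.mem_iff_getElem.mp hc
    constructor
    · intro habs; exact absurd habs (by decide)
    · intro ⟨hall, _⟩
      have := (hall j hj).1
      rw [List.getD_eq_getElem cs ' ' hj] at this
      rw [this] at hcd; exact absurd hcd (by decide)
  · rw [if_neg hdig]
    rw [List.any_eq_true] at hdig
    push_neg at hdig
    by_cases hpun : (List.range cs.length).any (fun i =>
        decide ((cs.getD i ' ' = ',' ∨ cs.getD i ' ' = '!' ∨ cs.getD i ' ' = '.') ∧ i ≠ cs.length - 1)) = true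
    · rw [if_pos hpun]
      rw [List.any_eq_true] at hpun
      obtain ⟨j, hj, hjp⟩ := hpun
      rw [List.mem_range] at hj
      rw [decide_eq_true_iff] at hjp
      constructor
      · intro habs; exact absurd habs (by decide)
      · intro ⟨hall, _⟩; exact ((hall j hj).2.1 hjp).elim
    · rw [if_neg hpun]
      rw [List.any_eq_true] at hpun
      push_neg at hpun
      rw [← List.countP_eq_length_filter]
      by_cases hcnt : ((List.range cs.length).countP (fun i => cs.getD i ' ' == '-')) > 1
      · rw [if_pos hcnt]
        constructor
        · intro habs; exact absurd habs (by decide)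
        · intro ⟨_, h2⟩; omega
      · rw [if_neg hcnt]
        rw [List.all_eq_true]
        constructor
        · intro hall
          refine ⟨fun j hj => ?_, by omega⟩
          refine ⟨?_, fun h1 => (hpun j (List.mem_range.mpr hj)) (by simpa using h1), fun hdj => ?_⟩
          · have hmemj : cs.getD j ' ' ∈ cs := by
              rw [List.getD_eq_getElem cs ' ' hj]; exact List.getElem_mem hj
            have := hdig (cs.getD j ' ') hmemj
            simpa using this
          · have hjm : j ∈ (List.range cs.length).filter (fun i => cs.getD i ' ' == '-') := by
              rw [List.mem_filter]
              exact ⟨List.mem_range.mpr hj, by simpa using hdj⟩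
            have := hall j hjm
            simp only [Bool.and_eq_true, decide_eq_true_iff] at this
            exact ⟨this.1.1.1, this.1.1.2, this.1.2, this.2⟩
        · intro ⟨hall, _⟩ j hjm
          rw [List.mem_filter, List.mem_range] at hjm
          have hg := (hall j hjm.1).2.2 (by simpa using hjm.2)
          simp only [Bool.and_eq_true, decide_eq_true_iff]
          exact ⟨⟨⟨hg.1, hg.2.1⟩, hg.2.2.1⟩, hg.2.2.2⟩

lemma pvWord_eq (cs : List Char) :
    pvALoop cs cs.length 0 0 = if pvValid cs then 0 else -1 := by
  have hchar := pvALoop_char cs cs.length (cs.length - 0) 0 0 rfl (by omega)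
  have hmem := pvALoop_mem cs cs.length (cs.length - 0) 0 0 rfl
  by_cases hv : pvValid cs = true
  · rw [if_pos hv]
    exact hchar.mpr (by simpa using (pvValid_iff cs).mp hv)
  · rw [if_neg hv]
    rcases hmem with h0 | h1
    · exact (hv ((pvValid_iff cs).mpr (by simpa using hchar.mp h0))).elim
    · exact h1

-- ===== VERDICT (by name: the statement is the Claim_ definition above) =====
theorem countValidWords_spec : Claim_equal_countValidWords := by
  intro sentence _
  unfold Spec_countValidWords countValidWords countValidWords_alt
  congr 1
  funext ans w
  by_cases hw : w = []
  · rw [if_neg (fun h => h hw), if_neg (fun h => h.1 hw)]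
  · rw [if_pos hw, pvWord_eq w]
    by_cases hv : pvValid w = true
    · rw [if_pos hv, if_pos ⟨hw, hv⟩]; omega
    · rw [if_neg hv, if_neg (fun h => hv h.2)]; omega
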